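-- pv_equiv track=rewrite | github.com/JianboTang/RL_semantic_parsing | utils/kmst.py | _prune_edges
-- ===== SOURCE A (Python) =====
-- def _prune_edges(vertice, edges):
--     _s = {}
--     for u in vertice:
--         if u not in _s:
--             _s[u] = {}
--         for v in vertice:
--             if u in edges and v in edges[u]:
--                 _s[u][v] = edges[u][v]
--     return _s
-- ===== SOURCE B (Python) =====
-- def _prune_edges(vertice, edges):
--     pos = {}
--     for u in vertice:
--         if u not in pos:
--             pos[u] = len(pos)
--     out = {}
--     for u in pos:
--         nbrs = edges.get(u)
--         if nbrs is None:
--             out[u] = {}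
--         else:
--             items = [(v, w) for v, w in nbrs.items() if v in pos]
--             items.sort(key=lambda t: pos[t[0]])
--             out[u] = dict(items)
--     return out
-- ===== Notes on version B (the rewrite author's own statement) =====
-- stated objective: faster
-- what changed: A runs a nested loop over vertice x vertice probing edges[u][v] for every pair; B builds a first-occurrence index of the vertices once, then for each distinct vertex iterates only its existing neighbor list, filters it by vertex membership and sorts it by the precomputed vertex index, removing the inner scan over all vertices.
import Mathlib
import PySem

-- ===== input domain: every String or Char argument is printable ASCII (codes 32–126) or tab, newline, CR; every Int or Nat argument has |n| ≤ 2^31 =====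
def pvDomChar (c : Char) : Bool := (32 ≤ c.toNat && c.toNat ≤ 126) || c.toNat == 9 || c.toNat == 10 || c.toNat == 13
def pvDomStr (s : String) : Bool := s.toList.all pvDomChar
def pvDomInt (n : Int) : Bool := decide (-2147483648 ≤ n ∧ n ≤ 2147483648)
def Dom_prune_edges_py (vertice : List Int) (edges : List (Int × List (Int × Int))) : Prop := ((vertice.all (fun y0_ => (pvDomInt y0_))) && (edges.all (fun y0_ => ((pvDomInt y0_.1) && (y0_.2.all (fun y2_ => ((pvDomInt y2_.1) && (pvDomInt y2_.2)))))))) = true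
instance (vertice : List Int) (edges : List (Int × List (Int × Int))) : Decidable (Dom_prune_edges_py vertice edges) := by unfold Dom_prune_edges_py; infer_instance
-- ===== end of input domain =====

-- B replaces A's nested vertice×vertice probing loop by one pass over each vertex's own
-- neighbor list, filtered by a vertex set and ordered by a precomputed first-occurrence
-- vertex index (objective: faster, asymptotically).

-- ===== PORT A =====
-- Literal transliteration of A: _s[u][v] = edges[u][v] is rendered as re-inserting the
-- updated inner dict at the (always present) key u.
def prune_edges_py (vertice : List Int) (edges : List (Int × List (Int × Int))) : List (Int × List (Int × Int)) :=
  let s : PySem.Dict Int (PySem.Dict Int Int) :=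
    vertice.foldl (fun s u =>
      vertice.foldl (fun s v =>
        match (PySem.Dict.mk edges).get? u with
        | none => s
        | some nbrs =>
          match (PySem.Dict.mk nbrs).get? v with
          | none => s
          | some w => s.insert u ((s.getD u PySem.Dict.empty).insert v w))
        (if s.contains u then s else s.insert u PySem.Dict.empty))
      PySem.Dict.empty
  s.items.map (fun p => (p.1, p.2.items))

-- ===== PORT B =====
def prune_edges_py_alt (vertice : List Int) (edges : List (Int × List (Int × Int))) : List (Int × List (Int × Int)) :=
  let pos : PySem.Dict Int Int :=
    vertice.foldl (fun d u => if d.contains u then d else d.insert u (d.size : Int)) PySem.Dict.empty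
  pos.keys.map (fun u =>
    match (PySem.Dict.mk edges).get? u with
    | none => (u, ([] : List (Int × Int)))
    | some nbrs =>
      (u, PySem.List.sorted (nbrs.filter (fun t => pos.contains t.1)) (fun t => pos.getD t.1 0)))

-- ===== PRECONDITION & SPEC =====
-- Pre_ excludes association lists with duplicate outer or inner keys: they are an ambiguous
-- representation of the Python dict argument (Python collapses duplicates last-wins before
-- the function ever runs), so no behaviour of A is canonically attached to them.
def Pre_prune_edges_py (vertice : List Int) (edges : List (Int × List (Int × Int))) : Prop :=
  (edges.map Prod.fst).Nodup ∧ ∀ e ∈ edges, (e.2.map Prod.fst).Nodup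
instance (vertice : List Int) (edges : List (Int × List (Int × Int))) : Decidable (Pre_prune_edges_py vertice edges) := by unfold Pre_prune_edges_py; infer_instance

def pvWitness_prune_edges_py : List Int × (List (Int × List (Int × Int))) :=
  ([1, 2, 1], [(1, [(2, 5), (3, 7)]), (4, [(1, 9)])])

def Spec_prune_edges_py (vertice : List Int) (edges : List (Int × List (Int × Int))) (out : List (Int × List (Int × Int))) : Prop := out = prune_edges_py_alt vertice edges
instance (vertice : List Int) (edges : List (Int × List (Int × Int))) (out : List (Int × List (Int × Int))) : Decidable (Spec_prune_edges_py vertice edges out) := by unfold Spec_prune_edges_py; infer_instance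

-- ===== CLAIM (what is proved, stated in full; the proofs are below) =====
def Claim_equal_prune_edges_py : Prop := ∀ (vertice : List Int) (edges : List (Int × List (Int × Int))), Dom_prune_edges_py vertice edges → Pre_prune_edges_py vertice edges → Spec_prune_edges_py vertice edges (prune_edges_py vertice edges)

-- ===== LEMMAS AND PROOFS =====

-- the lookup edges[u][v] (None where Python would raise / the `in` tests fail)
def pvLook (edges : List (Int × List (Int × Int))) (u v : Int) : Option Int :=
  match (PySem.Dict.mk edges).get? u with
  | none => none
  | some nbrs => (PySem.Dict.mk nbrs).get? v

-- generic: inserting the value already present at k is the identity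
theorem pv_insert_eq_self {κ ν : Type} [BEq κ] [LawfulBEq κ] (d : PySem.Dict κ ν) (k : κ) (v : ν)
    (hn : d.keys.Nodup) (h : d.get? k = some v) : d.insert k v = d := by
  apply PySem.Dict.ext
  have hc : d.contains k = true := by
    have := PySem.Dict.contains_iff_mem_keys d k
    have hm : (k, v) ∈ d.items := PySem.Dict.mem_items_of_get?_eq_some d h
    exact this.mpr (PySem.Dict.mem_keys_of_mem_items d hm)
  rw [PySem.Dict.items_insert_of_contains d v hc]
  have : ∀ p ∈ d.items, (if (p.1 == k) = true then (k, v) else p) = p := by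
    intro p hp
    by_cases hk : p.1 = k
    · have hgv : d.get? p.1 = some p.2 := PySem.Dict.get?_of_mem_items d hp hn
      rw [hk] at hgv; rw [hgv] at h
      have hv : p.2 = v := (Option.some.injEq _ _).mp h
      rw [if_pos (by simp [hk])]
      rw [← hv, ← hk]
    · simp [hk]
  calc List.map (fun p => if (p.1 == k) = true then (k, v) else p) d.items
      = List.map id d.items := List.map_congr_left (by intro a ha; simpa using this a ha)
    _ = d.items := List.map_id d.items

theorem pv_map_fst_zipIdx {α : Type} (l : List α) (k : Nat) : (l.zipIdx k).map Prod.fst = l := by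
  induction l generalizing k with
  | nil => rfl
  | cons x xs ih => simp [List.zipIdx, ih]

-- PySem.List.dedup over a snoc
theorem pv_dedup_snoc {α : Type} [BEq α] [LawfulBEq α] (l : List α) (x : α) :
    PySem.List.dedup (l ++ [x]) = if x ∈ l then PySem.List.dedup l else PySem.List.dedup l ++ [x] := by
  have h1 : PySem.Set.ofList (l ++ [x]) = PySem.Set.add (PySem.Set.ofList l) x := by
    rw [PySem.Set.ofList_eq_foldl, PySem.Set.ofList_eq_foldl, List.foldl_append]
    rfl
  have hmem : (PySem.Set.ofList l).contains x = true ↔ x ∈ l := by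
    unfold PySem.Set.contains
    rw [List.contains_iff_mem]
    exact PySem.Set.mem_ofList l x
  rw [PySem.List.dedup_eq_ofList, PySem.List.dedup_eq_ofList, h1]
  unfold PySem.Set.add
  by_cases hx : x ∈ l
  · rw [if_pos (hmem.mpr hx), if_pos hx]
  · have hc : ¬ ((PySem.Set.ofList l).contains x = true) := fun h => hx (hmem.mp h)
    rw [if_neg hc, if_neg hx]

-- ===== A-side characterisation =====

def pvInnerF (edges : List (Int × List (Int × Int))) (u : Int) (l : List Int) (d : PySem.Dict Int Int) : PySem.Dict Int Int :=
  l.foldl (fun d v => match pvLook edges u v with | none => d | some w => d.insert v w) d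

def pvYs (edges : List (Int × List (Int × Int))) (V : List Int) (u : Int) : List (Int × Int) :=
  V.filterMap (fun v => (pvLook edges u v).map (fun w => (v, w)))

theorem pv_mem_ys (edges : List (Int × List (Int × Int))) (V : List Int) (u : Int) (p : Int × Int) :
    p ∈ pvYs edges V u ↔ p.1 ∈ V ∧ pvLook edges u p.1 = some p.2 := by
  unfold pvYs
  rw [List.mem_filterMap]
  constructor
  · rintro ⟨a, ha, hfa⟩
    rcases Option.map_eq_some_iff.mp hfa with ⟨w, hw, hp⟩
    have h1 : a = p.1 := by rw [← hp]
    have h2 : w = p.2 := by rw [← hp]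
    subst h1; subst h2
    exact ⟨ha, hw⟩
  · rintro ⟨h1, h2⟩
    exact ⟨p.1, h1, by simp [h2]⟩

theorem pv_ys_map_fst (edges : List (Int × List (Int × Int))) (V : List Int) (u : Int) :
    (pvYs edges V u).map Prod.fst = V.filter (fun v => (pvLook edges u v).isSome) := by
  induction V with
  | nil => rfl
  | cons x xs ih =>
    unfold pvYs at *
    cases h : pvLook edges u x <;>
      simp [List.filter_cons, h, ih]

theorem pv_ys_nodup (edges : List (Int × List (Int × Int))) (V : List Int) (u : Int)
    (hV : V.Nodup) : (pvYs edges V u).Nodup := by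
  have : ((pvYs edges V u).map Prod.fst).Nodup := by
    rw [pv_ys_map_fst]
    exact hV.filter _
  exact List.Nodup.of_map _ this

theorem pv_items_innerF (edges : List (Int × List (Int × Int))) (u : Int) (l : List Int) :
    (pvInnerF edges u l PySem.Dict.empty).items = pvYs edges (PySem.List.dedup l) u := by
  induction l using List.reverseRecOn with
  | nil => rfl
  | append_singleton l x ih =>
    have hstep : pvInnerF edges u (l ++ [x]) PySem.Dict.empty
        = (match pvLook edges u x with
           | none => pvInnerF edges u l PySem.Dict.empty
           | some w => (pvInnerF edges u l PySem.Dict.empty).insert x w) := by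
      unfold pvInnerF
      rw [List.foldl_append]
      rfl
    have hkeys : (pvInnerF edges u l PySem.Dict.empty).keys
        = (PySem.List.dedup l).filter (fun v => (pvLook edges u v).isSome) := by
      show (pvInnerF edges u l PySem.Dict.empty).items.map Prod.fst = _
      rw [ih, pv_ys_map_fst]
    have hkn : (pvInnerF edges u l PySem.Dict.empty).keys.Nodup := by
      rw [hkeys]; exact (PySem.List.nodup_dedup l).filter _
    rw [hstep, pv_dedup_snoc]
    cases hlook : pvLook edges u x with
    | none =>
      show (pvInnerF edges u l PySem.Dict.empty).items = _
      by_cases hx : x ∈ l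
      · rw [if_pos hx]; exact ih
      · rw [if_neg hx]
        unfold pvYs
        rw [List.filterMap_append]
        simp [hlook, ← pvYs.eq_def, ih]
    | some w =>
      show ((pvInnerF edges u l PySem.Dict.empty).insert x w).items = _
      by_cases hx : x ∈ l
      · rw [if_pos hx]
        have hmem : (x, w) ∈ (pvInnerF edges u l PySem.Dict.empty).items := by
          rw [ih]
          exact (pv_mem_ys edges _ u (x, w)).mpr ⟨(PySem.List.mem_dedup l x).mpr hx, hlook⟩
        have hget : (pvInnerF edges u l PySem.Dict.empty).get? x = some w :=
          PySem.Dict.get?_of_mem_items _ hmem hkn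
        rw [pv_insert_eq_self _ _ _ hkn hget]
        exact ih
      · rw [if_neg hx]
        have hnc : (pvInnerF edges u l PySem.Dict.empty).contains x = false := by
          cases hc : (pvInnerF edges u l PySem.Dict.empty).contains x
          · rfl
          · exfalso
            have := (PySem.Dict.contains_iff_mem_keys _ x).mp hc
            rw [hkeys] at this
            exact hx ((PySem.List.mem_dedup l x).mp (List.mem_of_mem_filter this))
        rw [PySem.Dict.items_insert_of_not_contains _ _ hnc, ih]
        unfold pvYs
        rw [List.filterMap_append]
        simp [hlook]

theorem pv_keys_innerF_nodup (edges : List (Int × List (Int × Int))) (u : Int) (l : List Int) :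
    (pvInnerF edges u l PySem.Dict.empty).keys.Nodup := by
  have hkeys : (pvInnerF edges u l PySem.Dict.empty).keys
      = ((pvInnerF edges u l PySem.Dict.empty).items).map Prod.fst := rfl
  rw [hkeys, pv_items_innerF, pv_ys_map_fst]
  exact (PySem.List.nodup_dedup l).filter _

theorem pv_get?_innerF (edges : List (Int × List (Int × Int))) (u : Int) (l : List Int) (v : Int) (w : Int)
    (hv : v ∈ l) (h : pvLook edges u v = some w) :
    (pvInnerF edges u l PySem.Dict.empty).get? v = some w := by
  apply PySem.Dict.get?_of_mem_items _ _ (pv_keys_innerF_nodup edges u l)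
  rw [pv_items_innerF]
  exact (pv_mem_ys edges _ u (v, w)).mpr ⟨(PySem.List.mem_dedup l v).mpr hv, h⟩

theorem pv_innerF_eq_self (edges : List (Int × List (Int × Int))) (u : Int) (l : List Int) (d : PySem.Dict Int Int)
    (hn : d.keys.Nodup) (h : ∀ v ∈ l, ∀ w, pvLook edges u v = some w → d.get? v = some w) :
    pvInnerF edges u l d = d := by
  induction l with
  | nil => rfl
  | cons v l ih =>
    unfold pvInnerF
    rw [List.foldl_cons]
    cases hlook : pvLook edges u v with
    | none =>
      exact ih (fun v' hv' w hw => h v' (List.mem_cons_of_mem _ hv') w hw)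
    | some w =>
      show List.foldl _ (d.insert v w) l = d
      rw [pv_insert_eq_self d v w hn (h v List.mem_cons_self w hlook)]
      exact ih (fun v' hv' w hw => h v' (List.mem_cons_of_mem _ hv') w hw)

-- the inner loop of A only ever touches key u
theorem pv_foldl_bodyA (edges : List (Int × List (Int × Int))) (u : Int) (l : List Int)
    (s : PySem.Dict Int (PySem.Dict Int Int)) (hc : s.contains u = true) (hn : s.keys.Nodup) :
    l.foldl (fun s v =>
        match (PySem.Dict.mk edges).get? u with
        | none => s
        | some nbrs =>
          match (PySem.Dict.mk nbrs).get? v with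
          | none => s
          | some w => s.insert u ((s.getD u PySem.Dict.empty).insert v w)) s
      = s.insert u (pvInnerF edges u l (s.getD u PySem.Dict.empty)) := by
  have hbody : (fun (s : PySem.Dict Int (PySem.Dict Int Int)) (v : Int) =>
      match (PySem.Dict.mk edges).get? u with
      | none => s
      | some nbrs =>
        match (PySem.Dict.mk nbrs).get? v with
        | none => s
        | some w => s.insert u ((s.getD u PySem.Dict.empty).insert v w))
      = (fun s v =>
        match pvLook edges u v with
        | none => s
        | some w => s.insert u ((s.getD u PySem.Dict.empty).insert v w)) := by
    funext s v
    unfold pvLook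
    cases (PySem.Dict.mk edges).get? u with
    | none => rfl
    | some nbrs => rfl
  rw [hbody]
  clear hbody
  induction l generalizing s with
  | nil =>
    have hget : ∃ d0, s.get? u = some d0 := by
      rw [PySem.Dict.contains_eq_isSome_get?] at hc
      cases hg : s.get? u
      · rw [hg] at hc; simp at hc
      · exact ⟨_, rfl⟩
    rcases hget with ⟨d0, hd0⟩
    have : s.getD u PySem.Dict.empty = d0 := PySem.Dict.getD_of_get?_eq_some s _ hd0
    rw [List.foldl_nil]
    show s = s.insert u (s.getD u PySem.Dict.empty)
    rw [this, pv_insert_eq_self s u d0 hn hd0]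
  | cons v l ih =>
    rw [List.foldl_cons]
    cases hlook : pvLook edges u v with
    | none =>
      show List.foldl _ s l = _
      rw [ih s hc hn]
      congr 1
      show pvInnerF edges u l _ = pvInnerF edges u (v :: l) _
      unfold pvInnerF
      rw [List.foldl_cons]
      rw [hlook]
    | some w =>
      show List.foldl _ (s.insert u ((s.getD u PySem.Dict.empty).insert v w)) l = _
      rw [ih _ (PySem.Dict.contains_insert_self s u _) (PySem.Dict.nodup_keys_insert s u _ hn)]
      rw [PySem.Dict.insert_insert_self]
      congr 1
      have hgd : (s.insert u ((s.getD u PySem.Dict.empty).insert v w)).getD u PySem.Dict.empty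
          = (s.getD u PySem.Dict.empty).insert v w :=
        PySem.Dict.getD_insert_self s u _ _
      rw [hgd]
      show pvInnerF edges u l _ = pvInnerF edges u (v :: l) _
      unfold pvInnerF
      rw [List.foldl_cons]
      rw [hlook]

theorem pv_items_outer (vertice : List Int) (edges : List (Int × List (Int × Int))) (l : List Int) :
    (l.foldl (fun s u =>
      vertice.foldl (fun s v =>
        match (PySem.Dict.mk edges).get? u with
        | none => s
        | some nbrs =>
          match (PySem.Dict.mk nbrs).get? v with
          | none => s
          | some w => s.insert u ((s.getD u PySem.Dict.empty).insert v w))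
        (if s.contains u then s else s.insert u PySem.Dict.empty))
      PySem.Dict.empty).items
    = (PySem.List.dedup l).map (fun u => (u, pvInnerF edges u vertice PySem.Dict.empty)) := by
  induction l using List.reverseRecOn with
  | nil => rfl
  | append_singleton l x ih =>
    rw [List.foldl_append, List.foldl_cons, List.foldl_nil]
    set s := l.foldl (fun s u =>
      vertice.foldl (fun s v =>
        match (PySem.Dict.mk edges).get? u with
        | none => s
        | some nbrs =>
          match (PySem.Dict.mk nbrs).get? v with
          | none => s
          | some w => s.insert u ((s.getD u PySem.Dict.empty).insert v w))
        (if s.contains u then s else s.insert u PySem.Dict.empty))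
      PySem.Dict.empty with hs
    have hkeys : s.keys = PySem.List.dedup l := by
      show s.items.map Prod.fst = _
      rw [ih, List.map_map]
      exact List.map_id _
    have hkn : s.keys.Nodup := by rw [hkeys]; exact PySem.List.nodup_dedup l
    have hcx : s.contains x = true ↔ x ∈ l := by
      rw [PySem.Dict.contains_iff_mem_keys, hkeys, PySem.List.mem_dedup]
    rw [pv_dedup_snoc]
    by_cases hx : x ∈ l
    · rw [if_pos hx, if_pos (hcx.mpr hx)]
      have hmem : (x, pvInnerF edges x vertice PySem.Dict.empty) ∈ s.items := by
        rw [ih]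
        exact List.mem_map_of_mem ((PySem.List.mem_dedup l x).mpr hx)
      have hget : s.get? x = some (pvInnerF edges x vertice PySem.Dict.empty) :=
        PySem.Dict.get?_of_mem_items s hmem hkn
      have hgd : s.getD x PySem.Dict.empty = pvInnerF edges x vertice PySem.Dict.empty :=
        PySem.Dict.getD_of_get?_eq_some s _ hget
      rw [pv_foldl_bodyA edges x vertice s (hcx.mpr hx) hkn, hgd]
      rw [pv_innerF_eq_self edges x vertice _ (pv_keys_innerF_nodup edges x vertice)
        (fun v hv w hw => pv_get?_innerF edges x vertice v w hv hw)]
      rw [pv_insert_eq_self s x _ hkn hget]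
      exact ih
    · have hcf : s.contains x = false := by
        cases hc : s.contains x
        · rfl
        · exact absurd (hcx.mp hc) hx
      rw [if_neg hx, if_neg (by rw [hcf]; simp : ¬ s.contains x = true)]
      rw [pv_foldl_bodyA edges x vertice (s.insert x PySem.Dict.empty)
        (PySem.Dict.contains_insert_self s x _) (PySem.Dict.nodup_keys_insert s x _ hkn)]
      rw [PySem.Dict.getD_insert_self, PySem.Dict.insert_insert_self]
      have hnc2 : (s.insert x (pvInnerF edges x vertice PySem.Dict.empty)).items
          = s.items ++ [(x, pvInnerF edges x vertice PySem.Dict.empty)] :=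
        PySem.Dict.items_insert_of_not_contains s _ hcf
      rw [hnc2, ih, List.map_append]
      rfl

-- ===== B-side characterisation =====

def pvPos (vertice : List Int) : PySem.Dict Int Int :=
  vertice.foldl (fun d u => if d.contains u then d else d.insert u (d.size : Int)) PySem.Dict.empty

theorem pv_items_pos (l : List Int) :
    (pvPos l).items = (PySem.List.dedup l).zipIdx.map (fun p => (p.1, (p.2 : Int))) := by
  induction l using List.reverseRecOn with
  | nil => rfl
  | append_singleton l x ih =>
    unfold pvPos at *
    rw [List.foldl_append, List.foldl_cons, List.foldl_nil]
    set s := l.foldl (fun d u => if d.contains u then d else d.insert u (d.size : Int)) PySem.Dict.empty with hs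
    have hkeys : s.keys = PySem.List.dedup l := by
      show s.items.map Prod.fst = _
      rw [ih, List.map_map]
      calc (PySem.List.dedup l).zipIdx.map (Prod.fst ∘ (fun p => (p.1, (p.2 : Int))))
          = (PySem.List.dedup l).zipIdx.map Prod.fst := rfl
        _ = PySem.List.dedup l := pv_map_fst_zipIdx _ 0
    have hkn : s.keys.Nodup := by rw [hkeys]; exact PySem.List.nodup_dedup l
    have hcx : s.contains x = true ↔ x ∈ l := by
      rw [PySem.Dict.contains_iff_mem_keys, hkeys, PySem.List.mem_dedup]
    rw [pv_dedup_snoc]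
    by_cases hx : x ∈ l
    · rw [if_pos (hcx.mpr hx), if_pos hx]
      exact ih
    · have hcf : s.contains x = false := by
        cases hc : s.contains x
        · rfl
        · exact absurd (hcx.mp hc) hx
      rw [if_neg (by rw [hcf]; simp : ¬ s.contains x = true), if_neg hx]
      have hsize : s.size = (PySem.List.dedup l).length := by
        show s.items.length = _
        rw [ih, List.length_map, List.length_zipIdx]
      rw [PySem.Dict.items_insert_of_not_contains s _ hcf, ih, hsize]
      rw [List.zipIdx_append, List.map_append]
      simp [List.zipIdx]

theorem pv_keys_pos (l : List Int) : (pvPos l).keys = PySem.List.dedup l := by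
  show (pvPos l).items.map Prod.fst = _
  rw [pv_items_pos, List.map_map]
  calc (PySem.List.dedup l).zipIdx.map (Prod.fst ∘ (fun p => (p.1, (p.2 : Int))))
      = (PySem.List.dedup l).zipIdx.map Prod.fst := rfl
    _ = PySem.List.dedup l := pv_map_fst_zipIdx _ 0

theorem pv_pos_getD (l : List Int) (i : Nat) (hi : i < (PySem.List.dedup l).length) :
    (pvPos l).getD (PySem.List.dedup l)[i] 0 = (i : Int) := by
  apply PySem.Dict.getD_of_mem_items
  · rw [pv_items_pos]
    refine List.mem_map.mpr ⟨((PySem.List.dedup l)[i], i), ?_, rfl⟩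
    have : (PySem.List.dedup l).zipIdx[i]'(by rw [List.length_zipIdx]; exact hi) = ((PySem.List.dedup l)[i], i) := by
      rw [List.getElem_zipIdx]
      simp
    rw [← this]
    exact List.getElem_mem _
  · rw [pv_keys_pos]; exact PySem.List.nodup_dedup l

theorem pv_pos_pairwise (l : List Int) :
    (PySem.List.dedup l).Pairwise (fun a b => (pvPos l).getD a 0 < (pvPos l).getD b 0) := by
  rw [List.pairwise_iff_getElem]
  intro i j hi hj hij
  rw [pv_pos_getD l i hi, pv_pos_getD l j hj]
  exact_mod_cast hij

-- ===== assembly =====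

theorem pv_per_u (vertice : List Int) (edges : List (Int × List (Int × Int)))
    (hpre : Pre_prune_edges_py vertice edges) (u : Int) :
    (u, (pvInnerF edges u vertice PySem.Dict.empty).items)
      = (match (PySem.Dict.mk edges).get? u with
         | none => (u, ([] : List (Int × Int)))
         | some nbrs =>
           (u, PySem.List.sorted (nbrs.filter (fun t => (pvPos vertice).contains t.1))
                 (fun t => (pvPos vertice).getD t.1 0))) := by
  rw [pv_items_innerF]
  cases hu : (PySem.Dict.mk edges).get? u with
  | none =>
    show (u, pvYs edges (PySem.List.dedup vertice) u) = (u, [])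
    have hys : pvYs edges (PySem.List.dedup vertice) u = [] := by
      unfold pvYs
      rw [List.filterMap_eq_nil_iff]
      intro a _
      unfold pvLook
      rw [hu]
      simp
    rw [hys]
  | some nbrs =>
    show (u, pvYs edges (PySem.List.dedup vertice) u)
        = (u, PySem.List.sorted (nbrs.filter (fun t => (pvPos vertice).contains t.1))
            (fun t => (pvPos vertice).getD t.1 0))
    have hlook : ∀ v, pvLook edges u v = (PySem.Dict.mk nbrs).get? v := by
      intro v; unfold pvLook; rw [hu]
    have hmemE : (u, nbrs) ∈ edges := PySem.Dict.mem_items_of_get?_eq_some _ hu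
    have hfstn : (nbrs.map Prod.fst).Nodup := hpre.2 (u, nbrs) hmemE
    have hnn : nbrs.Nodup := List.Nodup.of_map _ hfstn
    have hkeysn : (PySem.Dict.mk nbrs).keys.Nodup := hfstn
    have hget_iff : ∀ p : Int × Int, ((PySem.Dict.mk nbrs).get? p.1 = some p.2 ↔ p ∈ nbrs) := by
      intro p
      exact PySem.Dict.get?_eq_some_iff_mem_items (PySem.Dict.mk nbrs) p.1 p.2 hkeysn
    have hcont : ∀ t : Int × Int, ((pvPos vertice).contains t.1 = true ↔ t.1 ∈ PySem.List.dedup vertice) := by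
      intro t
      rw [PySem.Dict.contains_iff_mem_keys, pv_keys_pos]
    have hsorted : PySem.List.sorted (nbrs.filter (fun t => (pvPos vertice).contains t.1))
        (fun t => (pvPos vertice).getD t.1 0) = pvYs edges (PySem.List.dedup vertice) u := by
      apply PySem.List.sorted_eq_of_perm_of_pairwise_lt
      · apply (List.perm_ext_iff_of_nodup
          (pv_ys_nodup edges _ u (PySem.List.nodup_dedup vertice)) (hnn.filter _)).mpr
        intro p
        rw [pv_mem_ys, List.mem_filter, hlook, hget_iff, hcont]
        exact And.comm
      · apply List.pairwise_filterMap.mpr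
        apply (pv_pos_pairwise vertice).imp
        intro a a' hlt b hb b' hb'
        have hb1 : b.1 = a := by
          rcases Option.map_eq_some_iff.mp hb with ⟨w, _, hw⟩
          rw [← hw]
        have hb1' : b'.1 = a' := by
          rcases Option.map_eq_some_iff.mp hb' with ⟨w, _, hw⟩
          rw [← hw]
        rw [hb1, hb1']
        exact hlt
    rw [hsorted]

-- ===== VERDICT (by name: the statement is the Claim_ definition above) =====
theorem prune_edges_py_spec : Claim_equal_prune_edges_py := by
  intro vertice edges _ hpre
  unfold Spec_prune_edges_py prune_edges_py prune_edges_py_alt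
  show ((vertice.foldl _ PySem.Dict.empty).items.map _) = _
  rw [pv_items_outer vertice edges vertice]
  show _ = (pvPos vertice).keys.map _
  rw [pv_keys_pos]
  rw [List.map_map]
  apply List.map_congr_left
  intro u _
  exact pv_per_u vertice edges hpre u
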